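-- pv_equiv track=rewrite | github.com/stefannmikiic/stem_agent | memory.py | cluster_failures
-- ===== SOURCE A (Python) =====
-- def cluster_failures(memory):
--     clusters = {
--         "type_error": 0,
--         "interface_violation": 0,
--         "malicious_input": 0,
--         "logic_error": 0,
--         "unknown": 0
--     }
--
--     for m in memory:
--         output = m.get("output", "").lower()
--
--         if "typeerror" in output:
--             clusters["type_error"] += 1
--
--         elif "keyerror" in output or "attributeerror" in output:
--             clusters["interface_violation"] += 1
--
--         elif "malicious" in output:
--             clusters["malicious_input"] += 1
--
--         elif "assert" in output or "failed" in output: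
--             clusters["logic_error"] += 1
--
--         else:
--             clusters["unknown"] += 1
--
--     return clusters
-- ===== SOURCE B (Python) =====
-- RULES = [
--     ("type_error", ("typeerror",)),
--     ("interface_violation", ("keyerror", "attributeerror")),
--     ("malicious_input", ("malicious",)),
--     ("logic_error", ("assert", "failed")),
-- ]
--
--
-- def cluster_failures(memory):
--     # Sieve: for each rule in priority order, count and remove the matching
--     # outputs from the remaining pool; whatever survives all rules is "unknown".
--     remaining = [m.get("output", "").lower() for m in memory]
--     clusters = {}
--     for cat, subs in RULES:
--         survivors = [o for o in remaining if not any(s in o for s in subs)]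
--         clusters[cat] = len(remaining) - len(survivors)
--         remaining = survivors
--     clusters["unknown"] = len(remaining)
--     return clusters
-- ===== Notes on version B (the rewrite author's own statement) =====
-- stated objective: alternative
-- what changed: Replaces A's per-item if/elif classification loop by a rule-outer sieve: for each category in priority order it counts and removes matching outputs from a shrinking pool (count = pool size minus survivors), and the leftover pool size is 'unknown'.
import Mathlib
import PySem

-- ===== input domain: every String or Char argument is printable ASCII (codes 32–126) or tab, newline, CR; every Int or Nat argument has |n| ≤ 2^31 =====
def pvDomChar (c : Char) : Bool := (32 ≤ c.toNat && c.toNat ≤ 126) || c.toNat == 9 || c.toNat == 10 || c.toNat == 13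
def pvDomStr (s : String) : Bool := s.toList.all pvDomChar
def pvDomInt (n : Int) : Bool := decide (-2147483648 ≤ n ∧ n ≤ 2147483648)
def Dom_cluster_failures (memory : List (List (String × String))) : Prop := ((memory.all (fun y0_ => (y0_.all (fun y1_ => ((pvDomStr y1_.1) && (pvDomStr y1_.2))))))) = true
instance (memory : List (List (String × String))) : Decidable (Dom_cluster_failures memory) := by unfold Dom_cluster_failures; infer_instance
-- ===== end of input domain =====

-- B replaces A's per-item if/elif counting loop by a rule-outer sieve: each category count is the shrinkage of a pool of outputs filtered rule by rule (alternative decomposition, same cost).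


-- ===== PORT A =====
-- loop body of A; every key is present from the start, so Python's `clusters[k] += 1`
-- is `clusters.modify k 0 (· + 1)` exactly
def clusterStep (clusters : PySem.Dict String Int) (m : List (String × String)) : PySem.Dict String Int :=
  let output := PySem.Str.lower ((PySem.Dict.mk m).getD "output" "")
  if PySem.Str.isIn "typeerror" output then clusters.modify "type_error" 0 (· + 1)
  else if PySem.Str.isIn "keyerror" output || PySem.Str.isIn "attributeerror" output then
    clusters.modify "interface_violation" 0 (· + 1)
  else if PySem.Str.isIn "malicious" output then clusters.modify "malicious_input" 0 (· + 1)
  else if PySem.Str.isIn "assert" output || PySem.Str.isIn "failed" output then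
    clusters.modify "logic_error" 0 (· + 1)
  else clusters.modify "unknown" 0 (· + 1)

def cluster_failures (memory : List (List (String × String))) : List (String × Int) :=
  (memory.foldl clusterStep
    (PySem.Dict.mk [("type_error", 0), ("interface_violation", 0), ("malicious_input", 0),
                    ("logic_error", 0), ("unknown", 0)])).items

-- ===== PORT B =====
def pvRules : List (String × List String) :=
  [("type_error", ["typeerror"]),
   ("interface_violation", ["keyerror", "attributeerror"]),
   ("malicious_input", ["malicious"]),
   ("logic_error", ["assert", "failed"])]

def pvAnyIn (subs : List String) (o : String) : Bool := subs.any (fun s => PySem.Str.isIn s o)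

-- rule-outer sieve: one fold over the rule table carrying (clusters so far, remaining pool)
def cluster_failures_alt (memory : List (List (String × String))) : List (String × Int) :=
  let init : PySem.Dict String Int × List String :=
    (PySem.Dict.mk [], memory.map (fun m => PySem.Str.lower ((PySem.Dict.mk m).getD "output" "")))
  let res := pvRules.foldl
    (fun st r =>
      let survivors := st.2.filter (fun o => !(pvAnyIn r.2 o))
      (st.1.insert r.1 ((st.2.length : Int) - (survivors.length : Int)), survivors))
    init
  (res.1.insert "unknown" ((res.2.length : Int))).items

-- ===== PRECONDITION & SPEC =====
def Spec_cluster_failures (memory : List (List (String × String))) (out : List (String × Int)) : Prop := out = cluster_failures_alt memory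
instance (memory : List (List (String × String))) (out : List (String × Int)) : Decidable (Spec_cluster_failures memory out) := by unfold Spec_cluster_failures; infer_instance

-- ===== CLAIM (what is proved, stated in full; the proofs are below) =====
def Claim_equal_cluster_failures : Prop := ∀ (memory : List (List (String × String))), Dom_cluster_failures memory → Spec_cluster_failures memory (cluster_failures memory)

-- ===== LEMMAS AND PROOFS =====
def outF (m : List (String × String)) : String := PySem.Str.lower ((PySem.Dict.mk m).getD "output" "")

def c1 (m : List (String × String)) : Bool := pvAnyIn ["typeerror"] (outF m)
def c2 (m : List (String × String)) : Bool :=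
  pvAnyIn ["keyerror", "attributeerror"] (outF m) && !pvAnyIn ["typeerror"] (outF m)
def c3 (m : List (String × String)) : Bool :=
  (pvAnyIn ["malicious"] (outF m) && !pvAnyIn ["keyerror", "attributeerror"] (outF m)) && !pvAnyIn ["typeerror"] (outF m)
def c4 (m : List (String × String)) : Bool :=
  ((pvAnyIn ["assert", "failed"] (outF m) && !pvAnyIn ["malicious"] (outF m)) && !pvAnyIn ["keyerror", "attributeerror"] (outF m)) && !pvAnyIn ["typeerror"] (outF m)
def c5 (m : List (String × String)) : Bool :=
  ((!pvAnyIn ["assert", "failed"] (outF m) && !pvAnyIn ["malicious"] (outF m)) && !pvAnyIn ["keyerror", "attributeerror"] (outF m)) && !pvAnyIn ["typeerror"] (outF m)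

def mkD (a b c d e : Int) : PySem.Dict String Int :=
  PySem.Dict.mk [("type_error", a), ("interface_violation", b), ("malicious_input", c),
                 ("logic_error", d), ("unknown", e)]

theorem fold_mkD (ms : List (List (String × String))) (a b c d e : Int) :
    ms.foldl clusterStep (mkD a b c d e)
      = mkD (a + (ms.countP c1 : Int)) (b + (ms.countP c2 : Int)) (c + (ms.countP c3 : Int))
            (d + (ms.countP c4 : Int)) (e + (ms.countP c5 : Int)) := by
  induction ms generalizing a b c d e with
  | nil => simp
  | cons m ms ih =>
    simp only [List.foldl_cons, List.countP_cons]
    cases h1 : PySem.Str.isIn "typeerror" (PySem.Str.lower ((PySem.Dict.mk m).getD "output" "")) with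
    | true =>
      have hs : clusterStep (mkD a b c d e) m = mkD (a+1) b c d e := by
        unfold clusterStep
        simp only [h1, if_true]
        simp [mkD, PySem.Dict.modify, PySem.Dict.insert, PySem.Dict.getD, PySem.Dict.get?, PySem.Dict.contains]
      rw [hs, ih]
      simp [mkD, c1, c2, c3, c4, c5, pvAnyIn, outF, h1, -PySem.Str.isIn_eq]
      omega
    | false =>
      cases h2 : (PySem.Str.isIn "keyerror" (PySem.Str.lower ((PySem.Dict.mk m).getD "output" "")) || PySem.Str.isIn "attributeerror" (PySem.Str.lower ((PySem.Dict.mk m).getD "output" ""))) with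
      | true =>
        have hs : clusterStep (mkD a b c d e) m = mkD a (b+1) c d e := by
          unfold clusterStep
          simp only [h1, h2, if_true, Bool.false_eq_true, if_false]
          simp [mkD, PySem.Dict.modify, PySem.Dict.insert, PySem.Dict.getD, PySem.Dict.get?, PySem.Dict.contains]
        rw [hs, ih]
        simp [mkD, c1, c2, c3, c4, c5, pvAnyIn, outF, h1, h2, -PySem.Str.isIn_eq]
        omega
      | false =>
        simp only [Bool.or_eq_false_iff] at h2
        cases h3 : PySem.Str.isIn "malicious" (PySem.Str.lower ((PySem.Dict.mk m).getD "output" "")) with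
        | true =>
          have hs : clusterStep (mkD a b c d e) m = mkD a b (c+1) d e := by
            unfold clusterStep
            simp only [h1, h2.1, h2.2, h3, if_true, Bool.false_eq_true, Bool.or_self, if_false]
            simp [mkD, PySem.Dict.modify, PySem.Dict.insert, PySem.Dict.getD, PySem.Dict.get?, PySem.Dict.contains]
          rw [hs, ih]
          simp [mkD, c1, c2, c3, c4, c5, pvAnyIn, outF, h1, h2.1, h2.2, h3, -PySem.Str.isIn_eq]
          omega
        | false =>
          cases h4 : (PySem.Str.isIn "assert" (PySem.Str.lower ((PySem.Dict.mk m).getD "output" "")) || PySem.Str.isIn "failed" (PySem.Str.lower ((PySem.Dict.mk m).getD "output" ""))) with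
          | true =>
            have hs : clusterStep (mkD a b c d e) m = mkD a b c (d+1) e := by
              unfold clusterStep
              simp only [h1, h2.1, h2.2, h3, h4, Bool.false_eq_true, Bool.or_self, if_false, if_true]
              simp [mkD, PySem.Dict.modify, PySem.Dict.insert, PySem.Dict.getD, PySem.Dict.get?, PySem.Dict.contains]
            rw [hs, ih]
            simp [mkD, c1, c2, c3, c4, c5, pvAnyIn, outF, h1, h2.1, h2.2, h3, h4, -PySem.Str.isIn_eq]
            omega
          | false =>
            simp only [Bool.or_eq_false_iff] at h4
            have hs : clusterStep (mkD a b c d e) m = mkD a b c d (e+1) := by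
              unfold clusterStep
              simp only [h1, h2.1, h2.2, h3, h4.1, h4.2, Bool.false_eq_true, Bool.or_self, if_false]
              simp [mkD, PySem.Dict.modify, PySem.Dict.insert, PySem.Dict.getD, PySem.Dict.get?, PySem.Dict.contains]
            rw [hs, ih]
            simp [mkD, c1, c2, c3, c4, c5, pvAnyIn, outF, h1, h2.1, h2.2, h3, h4.1, h4.2, -PySem.Str.isIn_eq]
            omega

-- pool shrinkage of one sieve stage = count of matches
theorem stage_len (L : List String) (p : String → Bool) :
    ((L.length : Int)) - (((L.filter fun o => !p o).length : Nat) : Int) = ((L.countP p : Nat) : Int) := by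
  induction L with
  | nil => simp
  | cons x L ih =>
    cases hp : p x <;> simp [hp] <;> omega

set_option maxHeartbeats 1000000 in
theorem alt_counts (ms : List (List (String × String))) :
    cluster_failures_alt ms
      = [("type_error", (ms.countP c1 : Int)), ("interface_violation", (ms.countP c2 : Int)),
         ("malicious_input", (ms.countP c3 : Int)), ("logic_error", (ms.countP c4 : Int)),
         ("unknown", (ms.countP c5 : Int))] := by
  unfold cluster_failures_alt pvRules
  simp only [List.foldl_cons, List.foldl_nil]
  simp [PySem.Dict.insert, PySem.Dict.contains, -List.filter_filter, -PySem.Str.isIn_eq]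
  refine ⟨?_, ?_, ?_, ?_, ?_⟩
  · rw [show ms.length = (List.map (fun m => PySem.Str.lower ((PySem.Dict.mk m).getD "output" "")) ms).length from (List.length_map ..).symm,
        stage_len _ (pvAnyIn ["typeerror"])]
    congr 1
    simp only [List.countP_map]
    rfl
  · rw [stage_len _ (pvAnyIn ["keyerror", "attributeerror"])]
    congr 1
    simp only [List.countP_filter, List.countP_map]
    rfl
  · rw [stage_len _ (pvAnyIn ["malicious"])]
    congr 1
    simp only [List.countP_filter, List.countP_map]
    rfl
  · rw [stage_len _ (pvAnyIn ["assert", "failed"])]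
    congr 1
    simp only [List.countP_filter, List.countP_map]
    rfl
  · rw [← List.countP_eq_length_filter]
    simp only [List.countP_filter, List.countP_map]
    rfl

theorem cluster_failures_spec : Claim_equal_cluster_failures := by
  intro memory _
  unfold Spec_cluster_failures
  show cluster_failures memory = cluster_failures_alt memory
  have h := fold_mkD memory 0 0 0 0 0
  simp only [cluster_failures,
    show (PySem.Dict.mk [("type_error", (0:Int)), ("interface_violation", 0), ("malicious_input", 0), ("logic_error", 0), ("unknown", 0)]) = mkD 0 0 0 0 0 from rfl, h]
  rw [alt_counts]
  simp [mkD]
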